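-- pv_equiv track=rewrite | github.com/seungh0/algorithm | 202108/20210804/64065.py | split_arr
-- ===== SOURCE A (Python) =====
-- def split_arr(param):
--     result, arr = [], []
--     temp = ""
--     for i in param[1:-1]:
--         if i == '}':
--             if temp:
--                 arr.append(int(temp))
--                 temp = ""
--             result.append(arr)
--             arr = []
--         elif i.isdigit():
--             temp += i
--         elif i == ',':
--             if temp:
--                 arr.append(int(temp))
--                 temp = ""
--     result.sort(key=len)
--     return result
-- ===== SOURCE B (Python) =====
-- def _parse_piece(piece):
--     out = []
--     for field in piece.split(','):
--         digits = ''.join(c for c in field if c.isdigit())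
--         if digits:
--             out.append(int(digits))
--     return out
--
--
-- def split_arr(param):
--     inner = param[1:-1]
--     result = [_parse_piece(p) for p in inner.split('}')[:-1]]
--     result.sort(key=len)
--     return result
-- ===== Notes on version B (the rewrite author's own statement) =====
-- stated objective: idiomatic
-- what changed: Replaced A's single-pass character state machine (temp/arr/result buffers with flush logic) by a split-based decomposition: strip the outer braces, split the inner text on the closing brace into array pieces (dropping the trailing piece), split each piece on commas and keep the digit characters of each field, then sort by length.
import Mathlib
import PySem

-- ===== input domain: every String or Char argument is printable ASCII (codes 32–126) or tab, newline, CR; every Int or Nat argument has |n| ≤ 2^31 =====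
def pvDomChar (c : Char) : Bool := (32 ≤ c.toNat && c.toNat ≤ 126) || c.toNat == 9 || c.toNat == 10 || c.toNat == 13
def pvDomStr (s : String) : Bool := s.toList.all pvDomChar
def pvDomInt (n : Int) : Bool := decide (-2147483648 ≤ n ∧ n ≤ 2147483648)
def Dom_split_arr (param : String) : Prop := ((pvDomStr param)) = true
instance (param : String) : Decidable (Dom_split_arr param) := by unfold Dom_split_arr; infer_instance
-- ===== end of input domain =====

-- B replaces A's char-by-char state machine by a split-into-pieces decomposition
-- (split on '}' for the arrays, split on ',' for the fields, keep the digit chars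
-- of each field); objective: more idiomatic/simpler, same asymptotic cost.

-- int(cs) for the digit runs both programs build; exact there (cs is a nonempty
-- run of '0'..'9', on which PySem.Int.ofStr? always returns some value).
def pyIntOf (cs : List Char) : Int := (PySem.Int.ofStr? (String.ofList cs)).getD 0

-- ===== PORT A =====
-- one loop step of A's for-loop, state = (result, arr, temp)
def stepA (st : List (List Int) × List Int × List Char) (i : Char) :
    List (List Int) × List Int × List Char :=
  let (result, arr, temp) := st
  if i = '}' then
    let (arr', temp') :=
      if temp ≠ [] then (arr ++ [pyIntOf temp], ([] : List Char)) else (arr, temp)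
    (result ++ [arr'], [], temp')
  else if PySem.Chars.isdigit i then (result, arr, temp ++ [i])
  else if i = ',' then
    if temp ≠ [] then (result, arr ++ [pyIntOf temp], ([] : List Char)) else (result, arr, temp)
  else (result, arr, temp)

def split_arr (param : String) : List (List Int) :=
  let inner := PySem.List.slice param.toList (some 1) (some (-1))
  let res := (inner.foldl stepA ([], [], [])).1
  PySem.List.sorted res (fun l => l.length) false

-- ===== PORT B =====
def parse_piece (piece : List Char) : List Int :=
  (piece.splitOn ',').foldl
    (fun out field =>
      let digits := field.filter PySem.Chars.isdigit
      if digits ≠ [] then out ++ [pyIntOf digits] else out) []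

def split_arr_alt (param : String) : List (List Int) :=
  let inner := PySem.List.slice param.toList (some 1) (some (-1))
  let result := (PySem.List.slice (inner.splitOn '}') none (some (-1))).map parse_piece
  PySem.List.sorted result (fun l => l.length) false

-- ===== PRECONDITION & SPEC =====
def Spec_split_arr (param : String) (out : List (List Int)) : Prop := out = split_arr_alt param
instance (param : String) (out : List (List Int)) : Decidable (Spec_split_arr param out) := by unfold Spec_split_arr; infer_instance

-- ===== CLAIM (what is proved, stated in full; the proofs are below) =====
def Claim_equal_split_arr : Prop := ∀ (param : String), Dom_split_arr param → Spec_split_arr param (split_arr param)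

-- ===== LEMMAS AND PROOFS =====

-- flush of A's temp buffer
def pvFlush (temp : List Char) : List Int := if temp = [] then [] else [pyIntOf temp]

-- spec of A's loop: the groups emitted from state (arr, temp) onwards
def pvGroups (arr : List Int) (temp : List Char) : List Char → List (List Int)
  | [] => []
  | c :: cs =>
    if c = '}' then (arr ++ pvFlush temp) :: pvGroups [] [] cs
    else if PySem.Chars.isdigit c then pvGroups arr (temp ++ [c]) cs
    else if c = ',' then pvGroups (arr ++ pvFlush temp) [] cs
    else pvGroups arr temp cs

-- A's processing of one '}'-free piece from state (arr, temp), flushed at the end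
def pvParseWith (arr : List Int) (temp : List Char) : List Char → List Int
  | [] => arr ++ pvFlush temp
  | c :: cs =>
    if PySem.Chars.isdigit c then pvParseWith arr (temp ++ [c]) cs
    else if c = ',' then pvParseWith (arr ++ pvFlush temp) [] cs
    else pvParseWith arr temp cs

-- field-level form of pvParseWith
def pvFieldFold (arr : List Int) (temp : List Char) : List (List Char) → List Int
  | [] => arr ++ pvFlush temp
  | f :: fs => pvFieldFold (arr ++ pvFlush (temp ++ f.filter PySem.Chars.isdigit)) [] fs

-- B's piece list with the first piece processed from seed state (arr, temp)
def pvSeedPieces (arr : List Int) (temp : List Char) : List (List Char) → List (List Int)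
  | [] => []
  | p :: ps => pvParseWith arr temp p :: ps.map parse_piece

theorem pvFoldA_eq_groups (cs : List Char) (res : List (List Int)) (arr : List Int)
    (temp : List Char) :
    (cs.foldl stepA (res, arr, temp)).1 = res ++ pvGroups arr temp cs := by
  induction cs generalizing res arr temp with
  | nil => simp [pvGroups]
  | cons c cs ih =>
    simp only [List.foldl_cons]
    by_cases h1 : c = '}' <;> by_cases h2 : PySem.Chars.isdigit c <;>
      by_cases h3 : c = ',' <;> by_cases ht : temp = [] <;>
      simp [stepA, pvGroups, pvFlush, h1, h2, h3, ht, ih,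
        show PySem.Chars.isdigit ',' = false from by decide]

theorem pvParseWith_eq_fieldFold (p : List Char) (arr : List Int) (temp : List Char) :
    pvParseWith arr temp p = pvFieldFold arr temp (p.splitOnP (· == ',')) := by
  induction p generalizing arr temp with
  | nil => simp [pvParseWith, List.splitOnP_nil, pvFieldFold, pvFlush]
  | cons c p ih =>
    obtain ⟨q, qs, hq⟩ := List.exists_cons_of_ne_nil (List.splitOnP_ne_nil (· == ',') p)
    rw [List.splitOnP_cons]
    by_cases h3 : c = ',' <;> by_cases h2 : PySem.Chars.isdigit c <;>
      simp [pvParseWith, pvFieldFold, h3, h2, hq, ih,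
        show PySem.Chars.isdigit ',' = false from by decide]

theorem pvFieldFold_nil_eq_foldl (fs : List (List Char)) (arr : List Int) :
    pvFieldFold arr [] fs =
      fs.foldl (fun out field =>
        let digits := field.filter PySem.Chars.isdigit
        if digits ≠ [] then out ++ [pyIntOf digits] else out) arr := by
  induction fs generalizing arr with
  | nil => simp [pvFieldFold, pvFlush]
  | cons f fs ih =>
    simp only [pvFieldFold, List.foldl_cons, List.nil_append]
    rw [ih]
    by_cases h : f.filter PySem.Chars.isdigit = [] <;> simp [pvFlush, h]

theorem pvParseWith_nil_nil (p : List Char) : pvParseWith [] [] p = parse_piece p := by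
  rw [pvParseWith_eq_fieldFold, parse_piece, List.splitOn.eq_1, pvFieldFold_nil_eq_foldl]

theorem pvSeedPieces_nil_nil (L : List (List Char)) :
    pvSeedPieces [] [] L = L.map parse_piece := by
  cases L <;> simp [pvSeedPieces, pvParseWith_nil_nil]

theorem pvGroups_eq_pieces (cs : List Char) (arr : List Int) (temp : List Char) :
    pvGroups arr temp cs = pvSeedPieces arr temp ((cs.splitOnP (· == '}')).dropLast) := by
  induction cs generalizing arr temp with
  | nil => simp [pvGroups, pvSeedPieces, List.splitOnP_nil]
  | cons c cs ih =>
    obtain ⟨q, qs, hq⟩ := List.exists_cons_of_ne_nil (List.splitOnP_ne_nil (· == '}') cs)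
    rw [List.splitOnP_cons]
    by_cases h1 : c = '}'
    · subst h1
      have h0 : pvGroups arr temp ('}' :: cs) = (arr ++ pvFlush temp) :: pvGroups [] [] cs := by
        simp [pvGroups]
      rw [h0, ih, pvSeedPieces_nil_nil, hq]
      simp [pvSeedPieces, pvParseWith]
    · by_cases hqs : qs = []
      · subst hqs
        by_cases h2 : PySem.Chars.isdigit c <;> by_cases h3 : c = ',' <;>
          simp [pvGroups, pvSeedPieces, h1, h2, h3, hq, ih,
            show PySem.Chars.isdigit ',' = false from by decide]
      · obtain ⟨r, rs, hrs⟩ := List.exists_cons_of_ne_nil hqs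
        subst hrs
        by_cases h2 : PySem.Chars.isdigit c <;> by_cases h3 : c = ',' <;>
          simp [pvGroups, pvSeedPieces, pvParseWith, h1, h2, h3, hq, ih,
            show PySem.Chars.isdigit ',' = false from by decide]

-- ===== VERDICT (by name: the statement is the Claim_ definition above) =====
theorem split_arr_spec : Claim_equal_split_arr := by
  intro param _
  unfold Spec_split_arr split_arr split_arr_alt
  simp only [pvFoldA_eq_groups, pvGroups_eq_pieces, pvSeedPieces_nil_nil,
    PySem.List.slice_to_neg_one, List.splitOn.eq_1, List.nil_append]
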